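-- pv_equiv track=rewrite | github.com/rawatpranjal/santafe | scripts/generate_market_intro_figures.py | build_supply_demand_curves
-- ===== SOURCE A (Python) =====
-- def build_supply_demand_curves(
--     buyer_valuations: list[list[int]], seller_costs: list[list[int]]
-- ) -> tuple[list[int], list[int], int, int, int]:
--     """
--     Build supply and demand curves from token valuations/costs.
--
--     Returns:
--         demand: Sorted valuations (descending)
--         supply: Sorted costs (ascending)
--         q_star: Equilibrium quantity
--         p_star: Equilibrium price
--         max_surplus: Maximum possible surplus
--     """
--     # Flatten and sort
--     demand = sorted([v for vals in buyer_valuations for v in vals], reverse=True)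
--     supply = sorted([c for costs in seller_costs for c in costs])
--
--     # Find equilibrium (where demand crosses supply)
--     q_star = 0
--     max_surplus = 0
--     for i in range(min(len(demand), len(supply))):
--         if demand[i] > supply[i]:
--             q_star = i + 1
--             max_surplus += demand[i] - supply[i]
--         else:
--             break
--
--     # Equilibrium price is midpoint of marginal pair
--     if q_star > 0:
--         p_star = (demand[q_star - 1] + supply[q_star - 1]) // 2
--     else:
--         p_star = (demand[0] + supply[0]) // 2
--
--     return demand, supply, q_star, p_star, max_surplus
-- ===== SOURCE B (Python) =====
-- def build_supply_demand_curves(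
--     buyer_valuations: list[list[int]], seller_costs: list[list[int]]
-- ) -> tuple[list[int], list[int], int, int, int]:
--     demand = sorted([v for vals in buyer_valuations for v in vals], reverse=True)
--     supply = sorted([c for costs in seller_costs for c in costs])
--     n = min(len(demand), len(supply))
--     # demand is non-increasing and supply non-decreasing, so demand[i] > supply[i]
--     # holds exactly on a prefix of [0, n): binary-search the end of that prefix.
--     lo, hi = 0, n
--     while lo < hi:
--         mid = (lo + hi) // 2
--         if demand[mid] > supply[mid]:
--             lo = mid + 1
--         else:
--             hi = mid
--     q_star = lo
--     max_surplus = sum(demand[:q_star]) - sum(supply[:q_star])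
--     k = q_star - 1 if q_star > 0 else 0
--     p_star = (demand[k] + supply[k]) // 2
--     return demand, supply, q_star, p_star, max_surplus
-- ===== Notes on version B (the rewrite author's own statement) =====
-- stated objective: alternative
-- what changed: A's linear break-loop that interleaves finding the crossing index with surplus accumulation is replaced by a binary search for the crossing point (correct because demand[i]-supply[i] is monotone non-increasing after the sorts), with max_surplus then computed as a difference of two prefix sums rather than a running sum of pairwise gaps.
-- outside the precondition, e.g. on build_supply_demand_curves([], [[3]]): A raises IndexError, B raises IndexError
import Mathlib
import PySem

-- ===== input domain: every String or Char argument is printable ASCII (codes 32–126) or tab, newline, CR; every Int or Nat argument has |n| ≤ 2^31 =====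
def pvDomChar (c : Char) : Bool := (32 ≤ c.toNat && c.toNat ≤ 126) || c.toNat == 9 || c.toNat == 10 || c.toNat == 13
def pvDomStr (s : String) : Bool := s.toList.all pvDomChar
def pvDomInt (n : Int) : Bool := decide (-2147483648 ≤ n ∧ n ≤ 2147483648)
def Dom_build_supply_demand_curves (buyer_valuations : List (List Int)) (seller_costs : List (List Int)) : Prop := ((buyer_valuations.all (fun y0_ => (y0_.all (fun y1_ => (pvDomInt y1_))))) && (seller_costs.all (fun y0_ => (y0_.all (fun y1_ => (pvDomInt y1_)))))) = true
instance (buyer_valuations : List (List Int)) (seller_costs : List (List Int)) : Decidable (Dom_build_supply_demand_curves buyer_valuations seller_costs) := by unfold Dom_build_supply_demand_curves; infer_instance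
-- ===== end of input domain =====

-- B replaces A's linear break-loop by a binary search for the demand/supply crossing point plus a prefix-sum difference for the surplus; objective: alternative algorithm, same cost (sorting dominates).


-- ===== PORT A =====
-- A's `for i in range(min(len,len))` loop with break; i < n keeps both indexings in range, so `.getD 0` is exact there
def pvALoop (demand supply : List Int) (n i : Nat) (q_star max_surplus : Int) : Int × Int :=
  if _h : i < n then
    let di := (PySem.List.pyGet? demand (i : Int)).getD 0
    let si := (PySem.List.pyGet? supply (i : Int)).getD 0
    if si < di then pvALoop demand supply n (i + 1) ((i : Int) + 1) (max_surplus + (di - si))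
    else (q_star, max_surplus)
  else (q_star, max_surplus)
termination_by n - i

def build_supply_demand_curves (buyer_valuations : List (List Int)) (seller_costs : List (List Int)) : List Int × List Int × Int × Int × Int :=
  let demand := PySem.List.sorted (buyer_valuations.flatMap (fun vals => vals)) (fun v => v) true
  let supply := PySem.List.sorted (seller_costs.flatMap (fun costs => costs)) (fun c => c) false
  let qm := pvALoop demand supply (min demand.length supply.length) 0 0 0
  let q_star := qm.1
  let max_surplus := qm.2
  let p_star :=
    if 0 < q_star then
      PySem.Int.floordiv ((PySem.List.pyGet? demand (q_star - 1)).getD 0 + (PySem.List.pyGet? supply (q_star - 1)).getD 0) 2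
    else
      PySem.Int.floordiv ((PySem.List.pyGet? demand 0).getD 0 + (PySem.List.pyGet? supply 0).getD 0) 2
  (demand, supply, q_star, p_star, max_surplus)

-- ===== PORT B =====
-- B's `while lo < hi` binary search; lo ≤ mid < hi ≤ n keeps both indexings in range, so `.getD 0` is exact there
def pvBSearch (demand supply : List Int) (lo hi : Nat) : Nat :=
  if _h : lo < hi then
    let mid := (lo + hi) / 2
    let dm := (PySem.List.pyGet? demand (mid : Int)).getD 0
    let sm := (PySem.List.pyGet? supply (mid : Int)).getD 0
    if sm < dm then pvBSearch demand supply (mid + 1) hi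
    else pvBSearch demand supply lo mid
  else lo
termination_by hi - lo
decreasing_by all_goals omega

def build_supply_demand_curves_alt (buyer_valuations : List (List Int)) (seller_costs : List (List Int)) : List Int × List Int × Int × Int × Int :=
  let demand := PySem.List.sorted (buyer_valuations.flatMap (fun vals => vals)) (fun v => v) true
  let supply := PySem.List.sorted (seller_costs.flatMap (fun costs => costs)) (fun c => c) false
  let n := min demand.length supply.length
  let q : Nat := pvBSearch demand supply 0 n
  -- sum(demand[:q_star]) - sum(supply[:q_star])
  let max_surplus := (demand.take q).sum - (supply.take q).sum
  let k : Nat := if 0 < q then q - 1 else 0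
  let p_star := PySem.Int.floordiv ((PySem.List.pyGet? demand (k : Int)).getD 0 + (PySem.List.pyGet? supply (k : Int)).getD 0) 2
  (demand, supply, (q : Int), p_star, max_surplus)

-- ===== PRECONDITION & SPEC =====
-- Pre_ excludes exactly the inputs where one flattened side is empty: there Python A (and B) raises IndexError at demand[...]/supply[...]
def Pre_build_supply_demand_curves (buyer_valuations : List (List Int)) (seller_costs : List (List Int)) : Prop :=
  buyer_valuations.flatMap (fun vals => vals) ≠ [] ∧ seller_costs.flatMap (fun costs => costs) ≠ []
instance (buyer_valuations : List (List Int)) (seller_costs : List (List Int)) : Decidable (Pre_build_supply_demand_curves buyer_valuations seller_costs) := by unfold Pre_build_supply_demand_curves; infer_instance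
def pvWitness_build_supply_demand_curves : List (List Int) × List (List Int) := ([[5, 2]], [[1, 4]])

def Spec_build_supply_demand_curves (buyer_valuations : List (List Int)) (seller_costs : List (List Int)) (out : List Int × List Int × Int × Int × Int) : Prop := out = build_supply_demand_curves_alt buyer_valuations seller_costs
instance (buyer_valuations : List (List Int)) (seller_costs : List (List Int)) (out : List Int × List Int × Int × Int × Int) : Decidable (Spec_build_supply_demand_curves buyer_valuations seller_costs out) := by unfold Spec_build_supply_demand_curves; infer_instance

-- ===== CLAIM (what is proved, stated in full; the proofs are below) =====
def Claim_equal_build_supply_demand_curves : Prop := ∀ (buyer_valuations : List (List Int)) (seller_costs : List (List Int)), Dom_build_supply_demand_curves buyer_valuations seller_costs → Pre_build_supply_demand_curves buyer_valuations seller_costs → Spec_build_supply_demand_curves buyer_valuations seller_costs (build_supply_demand_curves buyer_valuations seller_costs)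

-- ===== LEMMAS AND PROOFS =====

-- the index predicate "demand[i] > supply[i]" both programs decide, via safe getD indexing
def pvP (d s : List Int) (i : Nat) : Prop := s.getD i 0 < d.getD i 0

lemma pv_pyGetD (l : List Int) (i : Nat) (h : i < l.length) :
    (PySem.List.pyGet? l (i : Int)).getD 0 = l.getD i 0 := by
  simp [PySem.List.pyGet?_natCast, List.getD, List.getElem?_eq_getElem h]

-- A's loop computes the takeWhile prefix of the zipped curves (proved in the previous style)
lemma pvALoop_eq (d s : List Int) (i : Nat) (q ms : Int) :
    pvALoop d s (min d.length s.length) i q ms =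
      (let t := ((d.zip s).drop i).takeWhile (fun p => decide (p.2 < p.1))
       ((if t = [] then q else (i : Int) + t.length), ms + (t.map (fun p => p.1 - p.2)).sum)) := by
  fun_induction pvALoop d s (min d.length s.length) i q ms with
  | case1 i q ms h di si hlt ih =>
    have hd : i < d.length := lt_of_lt_of_le h (Nat.min_le_left _ _)
    have hs : i < s.length := lt_of_lt_of_le h (Nat.min_le_right _ _)
    have hdrop : (d.zip s).drop i = (d[i], s[i]) :: (d.zip s).drop (i + 1) := by
      rw [List.drop_eq_getElem_cons (by simp; omega)]; simp
    have hdi : di = d[i] := by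
      simp only [di, PySem.List.pyGet?_natCast, List.getElem?_eq_getElem hd, Option.getD_some]
    have hsi : si = s[i] := by
      simp only [si, PySem.List.pyGet?_natCast, List.getElem?_eq_getElem hs, Option.getD_some]
    rw [ih, hdrop]
    simp only [List.takeWhile_cons, hdi, hsi] at *
    rw [decide_eq_true hlt]
    split <;> rename_i ht <;> simp [ht] <;> constructor <;> omega
  | case2 i q ms h di si hge =>
    have hd : i < d.length := lt_of_lt_of_le h (Nat.min_le_left _ _)
    have hs : i < s.length := lt_of_lt_of_le h (Nat.min_le_right _ _)
    have hdrop : (d.zip s).drop i = (d[i], s[i]) :: (d.zip s).drop (i + 1) := by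
      rw [List.drop_eq_getElem_cons (by simp; omega)]; simp
    have hdi : di = d[i] := by
      simp only [di, PySem.List.pyGet?_natCast, List.getElem?_eq_getElem hd, Option.getD_some]
    have hsi : si = s[i] := by
      simp only [si, PySem.List.pyGet?_natCast, List.getElem?_eq_getElem hs, Option.getD_some]
    rw [hdrop]
    simp only [List.takeWhile_cons, hdi, hsi] at *
    rw [decide_eq_false (by omega)]
    simp
  | case3 i q ms h =>
    have : (d.zip s).drop i = [] := by
      apply List.drop_eq_nil_of_le; simp; omega
    simp [this]

-- generic: elements below the takeWhile length satisfy the predicate, the one at it does not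
lemma pv_tw_aux {α : Type} (q : α → Bool) (L : List α) (a : α) :
    (∀ i, i < (L.takeWhile q).length → q (L.getD i a) = true) ∧
    ((L.takeWhile q).length < L.length → q (L.getD (L.takeWhile q).length a) = false) := by
  induction L with
  | nil => simp
  | cons x xs ih =>
    by_cases hq : q x
    · refine ⟨?_, ?_⟩
      · intro i hi
        rw [List.takeWhile_cons_of_pos hq] at hi
        cases i with
        | zero => simpa using hq
        | succ j => simpa using ih.1 j (by simpa using Nat.lt_of_succ_lt_succ hi)
      · intro h
        rw [List.takeWhile_cons_of_pos hq] at h ⊢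
        simpa using ih.2 (by simpa using Nat.lt_of_succ_lt_succ h)
    · refine ⟨?_, ?_⟩
      · intro i hi; rw [List.takeWhile_cons_of_neg hq] at hi; simp at hi
      · intro _; rw [List.takeWhile_cons_of_neg hq]; simpa using hq

lemma pv_zip_getD (d s : List Int) (i : Nat) (h : i < min d.length s.length) :
    (d.zip s).getD i ((0 : Int), (0 : Int)) = (d.getD i 0, s.getD i 0) := by
  have h1 : i < d.length := lt_of_lt_of_le h (Nat.min_le_left _ _)
  have h2 : i < s.length := lt_of_lt_of_le h (Nat.min_le_right _ _)
  have hz : i < (d.zip s).length := by rw [List.length_zip]; omega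
  rw [List.getD_eq_getElem _ _ hz, List.getElem_zip,
      List.getD_eq_getElem _ _ h1, List.getD_eq_getElem _ _ h2]

-- the takeWhile prefix length is characterised by: pvP on every index below it, ¬pvP at it
lemma pv_takeWhile_len_spec (d s : List Int) :
    ((d.zip s).takeWhile (fun p => decide (p.2 < p.1))).length ≤ min d.length s.length ∧
    (∀ i, i < ((d.zip s).takeWhile (fun p => decide (p.2 < p.1))).length → pvP d s i) ∧
    (((d.zip s).takeWhile (fun p => decide (p.2 < p.1))).length < min d.length s.length →
      ¬ pvP d s ((d.zip s).takeWhile (fun p => decide (p.2 < p.1))).length) := by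
  have hlen : ((d.zip s).takeWhile (fun p => decide (p.2 < p.1))).length ≤ (d.zip s).length :=
    (List.takeWhile_prefix _).length_le
  have hn : (d.zip s).length = min d.length s.length := List.length_zip
  have haux := pv_tw_aux (fun p : Int × Int => decide (p.2 < p.1)) (d.zip s) ((0 : Int), (0 : Int))
  refine ⟨by omega, ?_, ?_⟩
  · intro i hi
    have hin : i < min d.length s.length := by omega
    have := haux.1 i hi
    rw [pv_zip_getD d s i hin] at this
    simpa [pvP] using this
  · intro hlt
    have := haux.2 (by omega)
    rw [pv_zip_getD d s _ hlt] at this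
    simpa [pvP] using this

-- binary-search correctness: given the prefix property of pvP (from sortedness), the
-- search returns the crossing index characterised as above
lemma pvBSearch_spec (d s : List Int) (n : Nat) (hn : n = min d.length s.length)
    (down : ∀ i j, i ≤ j → j < n → pvP d s j → pvP d s i)
    (lo hi : Nat) :
    lo ≤ hi → hi ≤ n →
    (∀ i, i < lo → pvP d s i) →
    (∀ i, hi ≤ i → i < n → ¬ pvP d s i) →
    pvBSearch d s lo hi ≤ n ∧ (∀ i, i < pvBSearch d s lo hi → pvP d s i) ∧
      (pvBSearch d s lo hi < n → ¬ pvP d s (pvBSearch d s lo hi)) := by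
  fun_induction pvBSearch d s lo hi with
  | case1 lo hi h mid dm sm hlt ih =>
    intro hlh hhn hlo hhi
    have hmid : mid = (lo + hi) / 2 := rfl
    have hmn : mid < n := by rw [hmid]; omega
    have hd : mid < d.length := by rw [hn] at hmn; omega
    have hs : mid < s.length := by rw [hn] at hmn; omega
    have hdm : dm = d.getD mid 0 := by
      simp only [dm]; exact pv_pyGetD d _ hd
    have hsm : sm = s.getD mid 0 := by
      simp only [sm]; exact pv_pyGetD s _ hs
    have hPmid : pvP d s mid := by
      unfold pvP; rw [← hdm, ← hsm]; exact hlt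
    exact ih (by rw [hmid] at *; omega) hhn (fun i hi' => down i _ (by omega) hmn hPmid) hhi
  | case2 lo hi h mid dm sm hge ih =>
    intro hlh hhn hlo hhi
    have hmid : mid = (lo + hi) / 2 := rfl
    have hmn : mid < n := by rw [hmid]; omega
    have hd : mid < d.length := by rw [hn] at hmn; omega
    have hs : mid < s.length := by rw [hn] at hmn; omega
    have hdm : dm = d.getD mid 0 := by
      simp only [dm]; exact pv_pyGetD d _ hd
    have hsm : sm = s.getD mid 0 := by
      simp only [sm]; exact pv_pyGetD s _ hs
    have hNmid : ¬ pvP d s mid := by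
      unfold pvP; rw [← hdm, ← hsm]; omega
    exact ih (by rw [hmid]; omega) (by omega) hlo
      (fun i h1 h2 hpi => hNmid (down _ i h1 h2 hpi))
  | case3 lo hi h =>
    intro hlh hhn hlo hhi
    exact ⟨by omega, hlo, fun hln => hhi lo (by omega) hln⟩

-- the two characterised indices coincide
lemma pv_cross_unique (d s : List Int) (n r t : Nat)
    (hr : r ≤ n ∧ (∀ i, i < r → pvP d s i) ∧ (r < n → ¬ pvP d s r))
    (ht : t ≤ n ∧ (∀ i, i < t → pvP d s i) ∧ (t < n → ¬ pvP d s t)) : r = t := by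
  by_contra hne
  rcases Nat.lt_or_ge r t with h | h
  · exact (hr.2.2 (lt_of_lt_of_le h ht.1)) (ht.2.1 r h)
  · have h' : t < r := by omega
    exact (ht.2.2 (lt_of_lt_of_le h' hr.1)) (hr.2.1 t h')

-- sortedness makes pvP a prefix property
lemma pv_down (d s : List Int)
    (hd : d.Pairwise (fun a b => b ≤ a)) (hs : s.Pairwise (fun a b => a ≤ b)) :
    ∀ i j, i ≤ j → j < min d.length s.length → pvP d s j → pvP d s i := by
  intro i j hij hj hP
  rcases eq_or_lt_of_le hij with rfl | hlt
  · exact hP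
  have hjd : j < d.length := lt_of_lt_of_le hj (Nat.min_le_left _ _)
  have hjs : j < s.length := lt_of_lt_of_le hj (Nat.min_le_right _ _)
  have hid : i < d.length := by omega
  have his : i < s.length := by omega
  have hd' := List.pairwise_iff_getElem.mp hd i j hid hjd hlt
  have hs' := List.pairwise_iff_getElem.mp hs i j his hjs hlt
  unfold pvP at *
  rw [List.getD_eq_getElem _ _ hjd, List.getD_eq_getElem _ _ hjs] at hP
  rw [List.getD_eq_getElem _ _ hid, List.getD_eq_getElem _ _ his]
  omega

lemma pv_take_zip (a b : List Int) (n : Nat) :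
    (a.zip b).take n = (a.take n).zip (b.take n) := by
  induction a generalizing b n with
  | nil => simp
  | cons x xs ih =>
    cases b with
    | nil => simp
    | cons y ys =>
      cases n with
      | zero => simp
      | succ m => simp [List.zip_cons_cons, ih]

-- surplus: pairwise-gap sum over the zipped prefix = difference of the two prefix sums
lemma pv_sum_zip_sub (a b : List Int) (h : a.length = b.length) :
    ((a.zip b).map (fun p => p.1 - p.2)).sum = a.sum - b.sum := by
  induction a generalizing b with
  | nil => cases b <;> simp_all
  | cons x xs ih =>
    cases b with
    | nil => simp at h
    | cons y ys => simp_all [List.zip_cons_cons]; omega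

-- ===== VERDICT (by name: the statement is the Claim_ definition above) =====
theorem build_supply_demand_curves_spec : Claim_equal_build_supply_demand_curves := by
  intro bv sc _hdom _hpre
  unfold Spec_build_supply_demand_curves build_supply_demand_curves build_supply_demand_curves_alt
  simp only []
  set demand := PySem.List.sorted (bv.flatMap (fun vals => vals)) (fun v => v) true with hdm
  set supply := PySem.List.sorted (sc.flatMap (fun costs => costs)) (fun c => c) false with hsp
  set t := ((demand.zip supply)).takeWhile (fun p => decide (p.2 < p.1)) with ht
  have htw := pv_takeWhile_len_spec demand supply
  rw [← ht] at htw
  have hdown := pv_down demand supply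
    (PySem.List.sorted_pairwise_rev (bv.flatMap (fun vals => vals)) (fun v => v))
    (PySem.List.sorted_pairwise (sc.flatMap (fun costs => costs)) (fun c => c))
  have hbs := pvBSearch_spec demand supply (min demand.length supply.length) rfl hdown
    0 (min demand.length supply.length) (Nat.zero_le _) (le_refl _)
    (fun i hi => absurd hi (Nat.not_lt_zero i)) (fun i h1 h2 => absurd h2 (by omega))
  have hq : pvBSearch demand supply 0 (min demand.length supply.length) = t.length :=
    pv_cross_unique demand supply (min demand.length supply.length) _ _ hbs htw
  have hloop := pvALoop_eq demand supply 0 0 0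
  simp only [List.drop_zero, ← ht] at hloop
  rw [hloop, hq]
  simp only [Nat.cast_zero, zero_add]
  have hq1 : (if (t = []) then (0 : Int) else (t.length : Int)) = (t.length : Int) := by
    split <;> simp_all
  rw [hq1]
  have hqn : t.length ≤ min demand.length supply.length := htw.1
  have htake : t = (demand.take t.length).zip (supply.take t.length) := by
    have hp : t = (demand.zip supply).take t.length :=
      List.prefix_iff_eq_take.mp (ht ▸ List.takeWhile_prefix _)
    conv_lhs => rw [hp]
    exact pv_take_zip demand supply t.length
  have hms : (t.map (fun p => p.1 - p.2)).sum =
      (demand.take t.length).sum - (supply.take t.length).sum := by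
    conv_lhs => rw [htake]
    apply pv_sum_zip_sub
    simp only [List.length_take]
    omega
  refine Prod.ext rfl (Prod.ext rfl (Prod.ext rfl (Prod.ext ?_ (by simpa using hms))))
  by_cases h0 : 0 < t.length
  · simp only [show (0:Int) < t.length by exact_mod_cast h0, if_pos, h0]
    have : ((t.length : Int) - 1) = ((t.length - 1 : Nat) : Int) := by
      push_cast [Nat.cast_sub h0]; ring
    rw [this]
  · have hz : t.length = 0 := by omega
    simp [hz]
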